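-- pv_equiv track=rewrite | github.com/fl-sean03/usm | io/mdf.py | _current_molecule_name_from_header
-- ===== SOURCE A (Python) =====
-- from typing import List, Dict, Any, Optional, Tuple
--
-- def _current_molecule_name_from_header(header_lines: List[str]) -> Optional[str]:
--     """
--     For simple single-@molecule files, capture the latest @molecule name.
--     If multiple @molecule sections exist, we keep order in preserved_text and still
--     assign the last seen name to atoms following it (v0.1).
--     """
--     mol_name: Optional[str] = None
--     for h in header_lines:
--         hs = h.strip()
--         if hs.lower().startswith("@molecule"):
--             # Format: @molecule Name (name may contain spaces but examples show single token)
--             parts = hs.split(maxsplit=1)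
--             if len(parts) == 2:
--                 mol_name = parts[1].strip()
--             else:
--                 mol_name = ""
--     return mol_name
-- ===== SOURCE B (Python) =====
-- from typing import List, Optional
--
-- def _current_molecule_name_from_header(header_lines: List[str]) -> Optional[str]:
--     # Scan backwards and return at the FIRST (i.e. last-in-file) @molecule line.
--     for h in reversed(header_lines):
--         hs = h.strip()
--         if hs.lower().startswith("@molecule"):
--             parts = hs.split(maxsplit=1)
--             return parts[1].strip() if len(parts) == 2 else ""
--     return None
-- ===== Notes on version B (the rewrite author's own statement) =====
-- stated objective: alternative
-- what changed: B scans the lines in reverse with an early return at the first @molecule match, instead of A's forward scan that keeps overwriting an accumulator.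
import Mathlib
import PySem

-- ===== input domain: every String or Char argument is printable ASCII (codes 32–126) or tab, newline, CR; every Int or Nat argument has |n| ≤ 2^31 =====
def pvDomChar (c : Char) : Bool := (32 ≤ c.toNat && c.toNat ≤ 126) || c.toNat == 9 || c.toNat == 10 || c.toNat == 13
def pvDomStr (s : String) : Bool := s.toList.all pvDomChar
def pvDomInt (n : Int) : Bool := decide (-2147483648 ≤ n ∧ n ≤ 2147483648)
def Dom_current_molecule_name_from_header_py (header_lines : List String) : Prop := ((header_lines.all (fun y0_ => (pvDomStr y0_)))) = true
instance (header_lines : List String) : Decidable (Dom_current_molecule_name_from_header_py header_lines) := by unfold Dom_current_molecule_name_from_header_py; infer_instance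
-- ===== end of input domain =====

-- B replaces A's forward accumulate-and-overwrite scan by a reverse scan with an early
-- return at the first match (same result: the last @molecule line wins). Objective: alternative.

-- ===== PORT A =====
-- forward loop, accumulator mol_name (starts at None, overwritten at each match)
def current_molecule_name_from_header_py (header_lines : List String) : Option String :=
  header_lines.foldl (fun mol_name h =>
    let hs := PySem.Str.strip h
    if PySem.Str.startswith (PySem.Str.lower hs) "@molecule" then
      let parts := PySem.Str.split₀Max hs 1
      if parts.length = 2 then
        -- parts[1]: length = 2 here, so the index is in range
        some (PySem.Str.strip (parts.getD 1 ""))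
      else some ""
    else mol_name) none

-- ===== PORT B =====
-- reverse scan with early return at the first match
def pvRevScan : List String → Option String
  | [] => none
  | h :: rest =>
    let hs := PySem.Str.strip h
    if PySem.Str.startswith (PySem.Str.lower hs) "@molecule" then
      let parts := PySem.Str.split₀Max hs 1
      some (if parts.length = 2 then PySem.Str.strip (parts.getD 1 "") else "")
    else pvRevScan rest

def current_molecule_name_from_header_py_alt (header_lines : List String) : Option String :=
  pvRevScan header_lines.reverse

-- ===== PRECONDITION & SPEC =====
def Spec_current_molecule_name_from_header_py (header_lines : List String) (out : Option String) : Prop := out = current_molecule_name_from_header_py_alt header_lines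
instance (header_lines : List String) (out : Option String) : Decidable (Spec_current_molecule_name_from_header_py header_lines out) := by unfold Spec_current_molecule_name_from_header_py; infer_instance

-- ===== CLAIM (what is proved, stated in full; the proofs are below) =====
def Claim_equal_current_molecule_name_from_header_py : Prop := ∀ (header_lines : List String), Dom_current_molecule_name_from_header_py header_lines → Spec_current_molecule_name_from_header_py header_lines (current_molecule_name_from_header_py header_lines)

-- ===== LEMMAS AND PROOFS =====

-- the single-line result: what one iteration contributes
def pvLine (h : String) : Option String :=
  let hs := PySem.Str.strip h
  if PySem.Str.startswith (PySem.Str.lower hs) "@molecule" then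
    some (if (PySem.Str.split₀Max hs 1).length = 2 then PySem.Str.strip ((PySem.Str.split₀Max hs 1).getD 1 "") else "")
  else none

theorem pvRevScan_cons (h : String) (t : List String) :
    pvRevScan (h :: t) = (pvLine h).orElse (fun _ => pvRevScan t) := by
  simp only [pvRevScan, pvLine]
  split_ifs <;> rfl

theorem pvRevScan_append (xs ys : List String) :
    pvRevScan (xs ++ ys) = (pvRevScan xs).orElse (fun _ => pvRevScan ys) := by
  induction xs with
  | nil => rfl
  | cons h t ih =>
    rw [List.cons_append, pvRevScan_cons, pvRevScan_cons, ih]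
    cases pvLine h <;> rfl

theorem pvFoldl_eq (l : List String) (acc : Option String) :
    l.foldl (fun mol_name h =>
      let hs := PySem.Str.strip h
      if PySem.Str.startswith (PySem.Str.lower hs) "@molecule" then
        let parts := PySem.Str.split₀Max hs 1
        if parts.length = 2 then some (PySem.Str.strip (parts.getD 1 ""))
        else some ""
      else mol_name) acc
    = (pvRevScan l.reverse).orElse (fun _ => acc) := by
  induction l generalizing acc with
  | nil => rfl
  | cons h t ih =>
    rw [List.foldl_cons, ih, List.reverse_cons, pvRevScan_append]
    have hstep : (let hs := PySem.Str.strip h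
        if PySem.Str.startswith (PySem.Str.lower hs) "@molecule" then
          let parts := PySem.Str.split₀Max hs 1
          if parts.length = 2 then some (PySem.Str.strip (parts.getD 1 ""))
          else some ""
        else acc) = (pvRevScan [h]).orElse (fun _ => acc) := by
      simp only [pvRevScan]
      split_ifs <;> rfl
    rw [hstep]
    cases pvRevScan t.reverse <;> cases pvRevScan [h] <;> rfl

-- ===== VERDICT (by name: the statement is the Claim_ definition above) =====
theorem current_molecule_name_from_header_py_spec : Claim_equal_current_molecule_name_from_header_py := by
  intro header_lines _
  unfold Spec_current_molecule_name_from_header_py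
  unfold current_molecule_name_from_header_py current_molecule_name_from_header_py_alt
  rw [pvFoldl_eq]
  cases pvRevScan header_lines.reverse <;> rfl
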